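-- pv_equiv track=rewrite | github.com/HoChangSUNG/baekjoon_python | stack/good_word.py | isGoodWord
-- ===== SOURCE A (Python) =====
-- def isGoodWord(word):
--     stack = []
--     for char in word:
--         if not stack or stack[-1]!=char:
--             stack.append(char)
--         else:
--             stack.pop()
--     return len(stack)==0
-- ===== SOURCE B (Python) =====
-- def _collapse_once(s):
--     out = []
--     i = 0
--     while i < len(s):
--         if i + 1 < len(s) and s[i] == s[i + 1]:
--             i += 2
--         else:
--             out.append(s[i])
--             i += 1
--     return "".join(out)
--
-- def isGoodWord(word):
--     s = word
--     prev = None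
--     while s != prev:
--         prev = s
--         s = _collapse_once(s)
--     return s == ""
-- ===== Notes on version B (the rewrite author's own statement) =====
-- stated objective: alternative
-- what changed: Replaced the single-pass stack simulation by a fixpoint repeated-collapse: one left-to-right pass deletes all (non-overlapping) adjacent equal pairs, repeated until a pass changes nothing; the word is good iff the residue is empty (confluence of the cancellation rewriting makes both agree).
import Mathlib
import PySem

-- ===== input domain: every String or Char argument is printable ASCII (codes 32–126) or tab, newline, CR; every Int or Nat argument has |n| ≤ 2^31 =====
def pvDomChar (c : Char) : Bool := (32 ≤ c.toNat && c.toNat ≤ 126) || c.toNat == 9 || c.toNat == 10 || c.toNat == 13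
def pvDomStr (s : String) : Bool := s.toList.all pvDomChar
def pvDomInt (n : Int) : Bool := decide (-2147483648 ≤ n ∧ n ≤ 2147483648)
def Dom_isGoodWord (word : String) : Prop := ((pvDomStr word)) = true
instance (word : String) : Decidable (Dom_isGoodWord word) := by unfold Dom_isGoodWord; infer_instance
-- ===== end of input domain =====

-- B replaces A's single-pass stack simulation by a fixpoint repeated-collapse (delete adjacent equal pairs until stable, then test emptiness): an alternative algorithm of similar size, not faster.


-- ===== PORT A =====
-- stack with its top at the list head; push = cons, pop = tail
def isGoodWord (word : String) : Bool :=
  (word.toList.foldl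
    (fun stack char =>
      if stack = [] || stack.head? != some char then char :: stack else stack.tail)
    []).length == 0

-- ===== PORT B =====
-- one scan of _collapse_once: drop each (non-overlapping) adjacent equal pair, keep the rest
def collapseOnce : List Char → List Char
  | a :: b :: rest => if a = b then collapseOnce rest else a :: collapseOnce (b :: rest)
  | l => l

theorem collapseOnce_length_le : ∀ (l : List Char), (collapseOnce l).length ≤ l.length := by
  intro l
  induction l using collapseOnce.induct with
  | case1 b rest ih =>
      have e : collapseOnce (b :: b :: rest) = collapseOnce rest := by simp [collapseOnce]
      rw [e]; simp only [List.length_cons]; omega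
  | case2 a b rest hab ih =>
      have e : collapseOnce (a :: b :: rest) = a :: collapseOnce (b :: rest) := by
        simp [collapseOnce, hab]
      rw [e]; simp only [List.length_cons] at ih ⊢; omega
  | case3 l hl =>
      match l, hl with
      | [], _ => simp [collapseOnce]
      | [a], _ => simp [collapseOnce]
      | a :: b :: r, hl => exact absurd rfl (hl a b r)

theorem collapseOnce_length_lt (l : List Char) (h : collapseOnce l ≠ l) :
    (collapseOnce l).length < l.length := by
  induction l using collapseOnce.induct with
  | case1 b rest ih =>
      have := collapseOnce_length_le rest
      have e : collapseOnce (b :: b :: rest) = collapseOnce rest := by simp [collapseOnce]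
      rw [e]; simp only [List.length_cons]; omega
  | case2 a b rest hab ih =>
      have hne : collapseOnce (b :: rest) ≠ b :: rest := by
        intro he; apply h; simp [collapseOnce, hab, he]
      have := ih hne
      have e : collapseOnce (a :: b :: rest) = a :: collapseOnce (b :: rest) := by
        simp [collapseOnce, hab]
      rw [e]; simp only [List.length_cons] at this ⊢; omega
  | case3 l hl =>
      exfalso; apply h
      match l, hl with
      | [], _ => rfl
      | [a], _ => rfl
      | a :: b :: r, hl => exact absurd rfl (hl a b r)

-- while s != prev loop: repeat collapseOnce until a pass changes nothing
def collapseLoop (l : List Char) : List Char :=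
  if h : collapseOnce l = l then l else collapseLoop (collapseOnce l)
termination_by l.length
decreasing_by exact collapseOnce_length_lt l h

def isGoodWord_alt (word : String) : Bool := collapseLoop word.toList == []

-- ===== PRECONDITION & SPEC =====
def Spec_isGoodWord (word : String) (out : Bool) : Prop := out = isGoodWord_alt word
instance (word : String) (out : Bool) : Decidable (Spec_isGoodWord word out) := by unfold Spec_isGoodWord; infer_instance

-- ===== CLAIM (what is proved, stated in full; the proofs are below) =====
def Claim_equal_isGoodWord : Prop := ∀ (word : String), Dom_isGoodWord word → Spec_isGoodWord word (isGoodWord word)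

-- ===== LEMMAS AND PROOFS =====

theorem collapseOnce_eq (b : Char) (rest : List Char) :
    collapseOnce (b :: b :: rest) = collapseOnce rest := by
  simp [collapseOnce]

theorem collapseOnce_ne {a b : Char} (hab : a ≠ b) (rest : List Char) :
    collapseOnce (a :: b :: rest) = a :: collapseOnce (b :: rest) := by
  simp [collapseOnce, hab]

-- A's step function, named for the proofs
def pvStep (stack : List Char) (char : Char) : List Char :=
  if stack = [] || stack.head? != some char then char :: stack else stack.tail

theorem pvStep_chain {acc : List Char} (h : List.IsChain (· ≠ ·) acc) (c : Char) :
    List.IsChain (· ≠ ·) (pvStep acc c) := by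
  match acc with
  | [] => simp [pvStep]
  | a :: t =>
      by_cases hac : a = c
      · subst hac
        simpa [pvStep] using h.tail
      · simp only [pvStep] at *
        simp [hac]
        exact ⟨Ne.symm hac, h⟩

theorem pvStep_pvStep {acc : List Char} (h : List.IsChain (· ≠ ·) acc) (a : Char) :
    pvStep (pvStep acc a) a = acc := by
  match acc with
  | [] => simp [pvStep]
  | x :: t =>
      by_cases hxa : x = a
      · subst hxa
        match t, h with
        | [], _ => simp [pvStep]
        | y :: t', h =>
            have hxy : x ≠ y := (List.isChain_cons_cons.mp h).1
            simp [pvStep, Ne.symm hxy]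
      · simp [pvStep, hxa]

theorem foldl_collapseOnce (l : List Char) :
    ∀ acc, List.IsChain (· ≠ ·) acc →
      List.foldl pvStep acc (collapseOnce l) = List.foldl pvStep acc l := by
  induction l using collapseOnce.induct with
  | case1 b rest ih =>
      intro acc hacc
      rw [collapseOnce_eq]
      simp only [List.foldl]
      rw [ih acc hacc, pvStep_pvStep hacc]
  | case2 a b rest hab ih =>
      intro acc hacc
      rw [collapseOnce_ne hab]
      simp only [List.foldl]
      exact ih (pvStep acc a) (pvStep_chain hacc a)
  | case3 l hl =>
      intro acc hacc
      match l, hl with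
      | [], _ => rfl
      | [a], _ => rfl
      | a :: b :: r, hl => exact absurd rfl (hl a b r)

theorem foldl_collapseLoop (l : List Char) :
    ∀ acc, List.IsChain (· ≠ ·) acc →
      List.foldl pvStep acc (collapseLoop l) = List.foldl pvStep acc l := by
  induction l using collapseLoop.induct with
  | case1 l h => intro acc _; rw [collapseLoop, dif_pos h]
  | case2 l h ih =>
      intro acc hacc
      rw [collapseLoop, dif_neg h, ih acc hacc, foldl_collapseOnce l acc hacc]

theorem fixpoint_chain (l : List Char) (h : collapseOnce l = l) :
    List.IsChain (· ≠ ·) l := by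
  induction l using collapseOnce.induct with
  | case1 b rest ih =>
      exfalso
      have hlt : (collapseOnce (b :: b :: rest)).length < (b :: b :: rest).length := by
        have := collapseOnce_length_le rest
        rw [collapseOnce_eq]
        simp only [List.length_cons]
        omega
      rw [h] at hlt
      omega
  | case2 a b rest hab ih =>
      rw [collapseOnce_ne hab] at h
      simp only [List.cons.injEq, true_and] at h
      exact List.isChain_cons_cons.mpr ⟨hab, ih h⟩
  | case3 l hl =>
      match l, hl with
      | [], _ => simp
      | [a], _ => simp
      | a :: b :: r, hl => exact absurd rfl (hl a b r)

theorem collapseLoop_fix (l : List Char) : collapseOnce (collapseLoop l) = collapseLoop l := by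
  induction l using collapseLoop.induct with
  | case1 l h => rw [collapseLoop, dif_pos h]; exact h
  | case2 l h ih => rw [collapseLoop, dif_neg h]; exact ih

theorem chain_foldl (l : List Char) :
    ∀ (a : Char) (s : List Char), List.IsChain (· ≠ ·) (a :: l) →
      List.foldl pvStep (a :: s) l = l.reverse ++ a :: s := by
  induction l with
  | nil => intro a s _; rfl
  | cons b rest ih =>
      intro a s h
      have hab : a ≠ b := (List.isChain_cons_cons.mp h).1
      have h2 : List.IsChain (· ≠ ·) (b :: rest) := (List.isChain_cons_cons.mp h).2
      simp only [List.foldl]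
      have hstep : pvStep (a :: s) b = b :: a :: s := by
        simp only [pvStep]
        rw [if_pos]
        simp [hab]
      rw [hstep, ih b (a :: s) h2]
      simp

theorem chain_foldl_nil (l : List Char) (h : List.IsChain (· ≠ ·) l) :
    List.foldl pvStep [] l = l.reverse := by
  match l, h with
  | [], _ => rfl
  | a :: rest, h =>
      have h1 : pvStep [] a = [a] := by simp [pvStep]
      simp only [List.foldl, h1]
      rw [chain_foldl rest a [] h]
      simp

-- ===== VERDICT (by name: the statement is the Claim_ definition above) =====
theorem isGoodWord_spec : Claim_equal_isGoodWord := by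
  intro word _
  unfold Spec_isGoodWord isGoodWord isGoodWord_alt
  set L := collapseLoop word.toList with hL
  have hchain : List.IsChain (· ≠ ·) L := fixpoint_chain L (collapseLoop_fix word.toList)
  have h1 : List.foldl pvStep [] word.toList = L.reverse := by
    rw [← foldl_collapseLoop word.toList [] (by simp), ← hL, chain_foldl_nil L hchain]
  have hstep : (fun stack char =>
      if stack = [] || stack.head? != some char then char :: stack else stack.tail) = pvStep := by
    funext s c; rfl
  rw [hstep, h1]
  simp only [List.length_reverse]
  cases L <;> simp
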